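-- pv_equiv track=rewrite | github.com/RamananVr/Leetcodepython | arrays_prefix_sum/2995_unknown_title.py | sum_of_distances
-- ===== SOURCE A (Python) =====
-- def sum_of_distances(nums):
--     """
--     Calculate the sum of absolute differences for each index in the array.
--
--     Args:
--     nums (List[int]): The input array of integers.
--
--     Returns:
--     List[int]: The result array where each element is the sum of absolute differences.
--     """
--     n = len(nums)
--     nums_sorted = sorted((num, i) for i, num in enumerate(nums))  # Sort nums with their original indices
--     sorted_nums = [num for num, _ in nums_sorted]
--     sorted_indices = [i for _, i in nums_sorted]
--
--     # Prefix sums for sorted array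
--     prefix_sum = [0] * n
--     prefix_sum[0] = sorted_nums[0]
--     for i in range(1, n):
--         prefix_sum[i] = prefix_sum[i - 1] + sorted_nums[i]
--
--     # Calculate result
--     result = [0] * n
--     for i in range(n):
--         num = sorted_nums[i]
--         left_sum = prefix_sum[i] - num  # Sum of elements to the left of current
--         right_sum = prefix_sum[-1] - prefix_sum[i]  # Sum of elements to the right of current
--         left_count = i
--         right_count = n - i - 1
--
--         # Total distance for current element
--         result[sorted_indices[i]] = (num * left_count - left_sum) + (right_sum - num * right_count)
--
--     return result
-- ===== SOURCE B (Python) =====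
-- def sum_of_distances(nums):
--     return [sum(abs(x - y) for y in nums) for x in nums]
-- ===== Notes on version B (the rewrite author's own statement) =====
-- stated objective: simpler
-- what changed: Drops the sort, prefix sums and index bookkeeping entirely: a direct double pass computes sum(abs(x - y)) for each element in original order.
import Mathlib
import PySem

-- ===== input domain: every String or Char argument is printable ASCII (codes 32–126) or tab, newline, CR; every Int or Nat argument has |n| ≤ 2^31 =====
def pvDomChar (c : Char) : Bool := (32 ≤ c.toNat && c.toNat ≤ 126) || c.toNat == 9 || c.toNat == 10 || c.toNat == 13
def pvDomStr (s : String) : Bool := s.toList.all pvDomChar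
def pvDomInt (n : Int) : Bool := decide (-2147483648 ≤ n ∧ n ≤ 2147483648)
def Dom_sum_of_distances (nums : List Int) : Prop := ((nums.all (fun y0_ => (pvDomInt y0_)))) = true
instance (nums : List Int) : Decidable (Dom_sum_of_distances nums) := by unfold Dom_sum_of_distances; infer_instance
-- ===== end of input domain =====

-- B drops A's sort + prefix-sum machinery for a direct quadratic double pass (objective: simpler).

-- ===== PORT A =====
def sum_of_distances (nums : List Int) : List Int :=
  let n : Int := PySem.List.len nums
  -- Python sorts the (num, i) tuples lexicographically; since the tie-breaking indices are
  -- strictly increasing before sorting, this equals the stable sort on the first component.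
  let nums_sorted := PySem.List.sorted ((PySem.List.enumerate nums).map (fun p => (p.2, p.1))) (fun r => r.1) false
  let sorted_nums := nums_sorted.map (fun r => r.1)
  let sorted_indices := nums_sorted.map (fun r => r.2)
  -- the first prefix-sum write raises IndexError on the empty list in Python; total forms used under Pre_ (nums ≠ [])
  let prefix1 := PySem.List.pySetD (List.replicate n.toNat (0 : Int)) 0 (PySem.List.pyGetD sorted_nums 0 0)
  let prefix_sum := (PySem.List.pyRange 1 n 1).foldl
    (fun pf i => PySem.List.pySetD pf i (PySem.List.pyGetD pf (i - 1) 0 + PySem.List.pyGetD sorted_nums i 0)) prefix1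
  (PySem.List.pyRange 0 n 1).foldl
    (fun res i =>
      let num := PySem.List.pyGetD sorted_nums i 0
      let left_sum := PySem.List.pyGetD prefix_sum i 0 - num
      let right_sum := PySem.List.pyGetD prefix_sum (-1) 0 - PySem.List.pyGetD prefix_sum i 0
      let left_count := i
      let right_count := n - i - 1
      PySem.List.pySetD res (PySem.List.pyGetD sorted_indices i 0)
        ((num * left_count - left_sum) + (right_sum - num * right_count)))
    (List.replicate n.toNat (0 : Int))

-- ===== PORT B =====
def sum_of_distances_alt (nums : List Int) : List Int :=
  nums.map (fun x => (nums.map (fun y => |x - y|)).sum)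

-- ===== PRECONDITION & SPEC =====
-- A's first prefix-sum write raises IndexError on the empty list; Pre_ excludes exactly that input (B returns [] there).
def Pre_sum_of_distances (nums : List Int) : Prop := nums ≠ []
instance (nums : List Int) : Decidable (Pre_sum_of_distances nums) := by unfold Pre_sum_of_distances; infer_instance
def pvWitness_sum_of_distances : List Int := [1, 4, 1, 3]

def Spec_sum_of_distances (nums : List Int) (out : List Int) : Prop := out = sum_of_distances_alt nums
instance (nums : List Int) (out : List Int) : Decidable (Spec_sum_of_distances nums out) := by unfold Spec_sum_of_distances; infer_instance

-- ===== CLAIM =====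
def Claim_equal_sum_of_distances : Prop := ∀ (nums : List Int), Dom_sum_of_distances nums → Pre_sum_of_distances nums → Spec_sum_of_distances nums (sum_of_distances nums)

-- ===== LEMMAS AND PROOFS =====

-- the per-element answer B computes
def gsum (nums : List Int) (x : Int) : Int := (nums.map (fun y => |x - y|)).sum

-- A's sorted pair list and its two projections
def qpairs (nums : List Int) : List (Int × Int) :=
  PySem.List.sorted ((PySem.List.enumerate nums).map (fun p => (p.2, p.1))) (fun r => r.1) false

lemma sum_map_sub_const (l : List Int) (a : Int) :
    (l.map (fun y => a - y)).sum = l.length * a - l.sum := by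
  induction l with
  | nil => simp
  | cons x xs ih => simp [ih]; ring

lemma sum_map_sub_const' (l : List Int) (a : Int) :
    (l.map (fun y => y - a)).sum = l.sum - l.length * a := by
  induction l with
  | nil => simp
  | cons x xs ih => simp [ih]; ring

lemma qpairs_perm (nums : List Int) :
    (qpairs nums).Perm ((PySem.List.enumerate nums).map (fun p => (p.2, p.1))) :=
  PySem.List.sorted_perm _ _ _

lemma qpairs_fst_perm (nums : List Int) : ((qpairs nums).map Prod.fst).Perm nums := by
  have h := (qpairs_perm nums).map Prod.fst
  have h2 : List.map (Prod.fst ∘ fun p : Int × Int => (p.2, p.1)) (PySem.List.enumerate nums) = nums := by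
    simp [Function.comp_def]
  simpa [List.map_map, h2] using h

lemma qpairs_snd_perm (nums : List Int) :
    ((qpairs nums).map Prod.snd).Perm (PySem.List.pyRange 0 nums.length 1) := by
  have h := (qpairs_perm nums).map Prod.snd
  have h2 : ((PySem.List.enumerate nums).map (fun p => (p.2, p.1))).map Prod.snd
      = (PySem.List.enumerate nums 0).map (fun p => p.1) := by
    simp [List.map_map, Function.comp]
  rw [h2] at h
  simpa [PySem.List.map_fst_enumerate] using h

lemma qpairs_mem (nums : List Int) {p : Int × Int} (hp : p ∈ qpairs nums) :
    ∃ (k : Nat) (h : k < nums.length), p = (nums[k], (k : Int)) := by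
  have := (qpairs_perm nums).mem_iff.mp hp
  rcases List.mem_map.mp this with ⟨r, hr, he⟩
  rcases (PySem.List.mem_enumerate_iff _ _ _).mp hr with ⟨k, hk, rfl⟩
  exact ⟨k, hk, by simp [← he]⟩

lemma qpairs_sorted (nums : List Int) :
    ((qpairs nums).map Prod.fst).Pairwise (· ≤ ·) :=
  PySem.List.sorted_map_key_pairwise _ _

lemma length_qpairs (nums : List Int) : (qpairs nums).length = nums.length := by
  simpa using (qpairs_perm nums).length_eq

-- value identity on the sorted list: the prefix-sum formula computes Σ |s[i] - y|
lemma value_eq (s nums : List Int) (hperm : s.Perm nums) (hsort : s.Pairwise (· ≤ ·))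
    (i : Nat) (hi : i < s.length) :
    (s.getD i 0 * (i : Int) - ((s.take (i+1)).sum - s.getD i 0))
      + ((s.sum - (s.take (i+1)).sum) - s.getD i 0 * ((s.length : Int) - i - 1))
    = gsum nums (s.getD i 0) := by
  have ha : s.getD i 0 = s[i] := List.getD_eq_getElem s 0 hi
  have htake : s.take (i+1) = s.take i ++ [s[i]] := by
    rw [List.take_add_one]; simp [List.getElem?_eq_getElem hi]
  have hs_eq : s = s.take i ++ s[i] :: s.drop (i+1) := by
    conv_lhs => rw [← List.take_append_drop (i+1) s]
    rw [htake]; simp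
  have hpw := hsort
  rw [hs_eq, List.pairwise_append] at hpw
  obtain ⟨h1, h2, h12⟩ := hpw
  have hle1 : ∀ y ∈ s.take i, y ≤ s[i] := fun y hy => h12 y hy s[i] (by rw [List.mem_cons]; left; rfl)
  have hle2 : ∀ y ∈ s.drop (i+1), s[i] ≤ y := (List.pairwise_cons.mp h2).1
  have hmap1 : ((s.take i).map (fun y => |s[i] - y|)) = (s.take i).map (fun y => s[i] - y) :=
    List.map_congr_left (fun y hy => abs_of_nonneg (by have := hle1 y hy; omega))
  have hmap2 : ((s.drop (i+1)).map (fun y => |s[i] - y|)) = (s.drop (i+1)).map (fun y => y - s[i]) :=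
    List.map_congr_left (fun y hy => by
      have := hle2 y hy; rw [abs_sub_comm]; exact abs_of_nonneg (by omega))
  have hg : gsum nums s[i] = (s.map (fun y => |s[i] - y|)).sum :=
    ((hperm.map _).sum_eq).symm
  have hlen1 : ((s.take i).length : Int) = (i : Int) := by
    simp [List.length_take]; omega
  have hlen2 : ((s.drop (i+1)).length : Int) = (s.length : Int) - i - 1 := by
    simp [List.length_drop]; omega
  have e1 : (s.take (i+1)).sum = (s.take i).sum + s[i] := by
    rw [htake, List.sum_append, List.sum_singleton]
  have e2 : s.sum = (s.take i).sum + s[i] + (s.drop (i+1)).sum := by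
    conv_lhs => rw [hs_eq]
    rw [List.sum_append, List.sum_cons]; ring
  have e3 : (s.map (fun y => |s[i] - y|)).sum
      = (i : Int) * s[i] - (s.take i).sum
        + ((s.drop (i+1)).sum - ((s.length : Int) - i - 1) * s[i]) := by
    have e3' : (s.map (fun y => |s[i] - y|)).sum
        = ((s.take i ++ s[i] :: s.drop (i+1)).map (fun y => |s[i] - y|)).sum :=
      congrArg List.sum (congrArg (List.map fun y => |s[i] - y|) hs_eq)
    rw [e3', List.map_append, List.map_cons, List.sum_append, List.sum_cons,
      hmap1, hmap2, sum_map_sub_const, sum_map_sub_const', hlen1, hlen2]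
    simp
  rw [ha, hg, e1, e2, e3]
  ring

lemma sum_take_succ (s : List Int) (k : Nat) (hk : k < s.length) :
    (s.take (k+1)).sum = (s.take k).sum + s[k] := by
  rw [List.take_add_one, List.getElem?_eq_getElem hk]
  simp only [Option.toList_some, List.sum_append, List.sum_cons, List.sum_nil]
  ring

lemma prefix_init (s : List Int) (hs : s ≠ []) :
    (PySem.List.pySetD (List.replicate s.length (0 : Int)) 0 (PySem.List.pyGetD s 0 0)).length = s.length
    ∧ ∀ k : Nat, k < s.length →
      (PySem.List.pySetD (List.replicate s.length (0 : Int)) 0 (PySem.List.pyGetD s 0 0)).getD k 0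
        = if k < 1 then (s.take (k+1)).sum else 0 := by
  obtain ⟨a, t, rfl⟩ := List.exists_cons_of_ne_nil hs
  have hset : PySem.List.pySetD (List.replicate (a::t).length (0:Int)) 0 (PySem.List.pyGetD (a::t) 0 0)
      = (List.replicate (a::t).length (0:Int)).set 0 (PySem.List.pyGetD (a::t) 0 0) := by
    simp [PySem.List.pySetD_of_nonneg]
  rw [hset]
  constructor
  · simp
  · intro k hk
    rw [List.getD_eq_getElem _ _ (by simpa using hk), List.getElem_set]
    rcases Nat.eq_zero_or_pos k with h0 | h0
    · subst h0; simp [PySem.List.pyGetD_zero]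
    · rw [if_neg (by omega), if_neg (by omega)]
      simp

-- the prefix-sum fold: length and pointwise characterisation
lemma prefix_inv (s : List Int) (hs : s ≠ []) (m : Nat) (hm : m ≤ s.length) :
    ((PySem.List.pyRange 1 m 1).foldl
      (fun pf i => PySem.List.pySetD pf i (PySem.List.pyGetD pf (i - 1) 0 + PySem.List.pyGetD s i 0))
      (PySem.List.pySetD (List.replicate s.length (0 : Int)) 0 (PySem.List.pyGetD s 0 0))).length = s.length
    ∧ ∀ k : Nat, k < s.length →
      ((PySem.List.pyRange 1 m 1).foldl
        (fun pf i => PySem.List.pySetD pf i (PySem.List.pyGetD pf (i - 1) 0 + PySem.List.pyGetD s i 0))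
        (PySem.List.pySetD (List.replicate s.length (0 : Int)) 0 (PySem.List.pyGetD s 0 0))).getD k 0
      = if k < max m 1 then (s.take (k+1)).sum else 0 := by
  induction m with
  | zero =>
    rw [PySem.List.pyRange_one_eq_nil (by norm_num)]
    simpa using prefix_init s hs
  | succ m ih =>
    rcases Nat.eq_zero_or_pos m with h0 | h0
    · subst h0
      rw [show ((0:Nat)+1 : Nat) = 1 from rfl, PySem.List.pyRange_one_eq_nil (by norm_num)]
      simpa using prefix_init s hs
    · have hm' : m ≤ s.length := by omega
      obtain ⟨ihl, ihv⟩ := ih hm'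
      have hrange : PySem.List.pyRange 1 ((m+1 : Nat) : Int) 1
          = PySem.List.pyRange 1 (m : Int) 1 ++ [(m : Int)] := by
        have : ((m+1 : Nat) : Int) = (m : Int) + 1 := by push_cast; ring
        rw [this, PySem.List.pyRange_one_succ_right (by exact_mod_cast h0)]
      rw [hrange, List.foldl_append, List.foldl_cons, List.foldl_nil]
      set F := (PySem.List.pyRange 1 (m : Int) 1).foldl
        (fun pf i => PySem.List.pySetD pf i (PySem.List.pyGetD pf (i - 1) 0 + PySem.List.pyGetD s i 0))
        (PySem.List.pySetD (List.replicate s.length (0 : Int)) 0 (PySem.List.pyGetD s 0 0)) with hF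
      have hv' : PySem.List.pyGetD F ((m : Int) - 1) 0 + PySem.List.pyGetD s (m : Int) 0
          = (s.take (m+1)).sum := by
        have hc : ((m : Int) - 1) = ((m - 1 : Nat) : Int) := by omega
        rw [hc, PySem.List.pyGetD_natCast, PySem.List.pyGetD_natCast]
        rw [ihv (m-1) (by omega)]
        rw [if_pos (by omega)]
        have h1 : m - 1 + 1 = m := by omega
        rw [h1]
        have hsm : s.getD m 0 = s[m]'(by omega) := List.getD_eq_getElem s 0 (by omega)
        rw [hsm, sum_take_succ s m (by omega)]
      rw [PySem.List.pySetD_natCast, hv']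
      constructor
      · simp [ihl]
      · intro k hk
        rw [List.getD_eq_getElem _ _ (by simp [ihl, hk]), List.getElem_set]
        by_cases hkm : m = k
        · subst hkm
          rw [if_pos rfl, if_pos (by omega)]
        · rw [if_neg hkm]
          have := ihv k hk
          rw [List.getD_eq_getElem _ _ (by simp [ihl, hk])] at this
          rw [this]
          have hmax : max m 1 = m := by omega
          have hmax' : max (m+1) 1 = m+1 := by omega
          rw [hmax, hmax']
          by_cases hlt : k < m
          · rw [if_pos hlt, if_pos (by omega)]
          · rw [if_neg hlt, if_neg (by omega)]

def sArr (nums : List Int) : List Int := (qpairs nums).map Prod.fst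
def iArr (nums : List Int) : List Int := (qpairs nums).map Prod.snd

lemma length_sArr (nums : List Int) : (sArr nums).length = nums.length := by
  simp [sArr, length_qpairs]

lemma length_iArr (nums : List Int) : (iArr nums).length = nums.length := by
  simp [iArr, length_qpairs]

lemma sArr_ne_nil (nums : List Int) (hne : nums ≠ []) : sArr nums ≠ [] := by
  intro h
  have := length_sArr nums
  rw [h] at this
  exact hne (List.length_eq_zero_iff.mp this.symm)

-- the prefix-sum list A builds, named
def pArr (nums : List Int) : List Int :=
  (PySem.List.pyRange 1 (nums.length : Int) 1).foldl
    (fun pf i => PySem.List.pySetD pf i (PySem.List.pyGetD pf (i - 1) 0 + PySem.List.pyGetD (sArr nums) i 0))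
    (PySem.List.pySetD (List.replicate nums.length (0 : Int)) 0 (PySem.List.pyGetD (sArr nums) 0 0))

lemma pArr_char (nums : List Int) (hne : nums ≠ []) :
    (pArr nums).length = nums.length
    ∧ ∀ k : Nat, k < nums.length → (pArr nums).getD k 0 = ((sArr nums).take (k+1)).sum := by
  have hlen := length_sArr nums
  have hP := prefix_inv (sArr nums) (sArr_ne_nil nums hne) nums.length (le_of_eq hlen.symm)
  rw [hlen] at hP
  have hpos : 0 < nums.length := List.length_pos_iff.mpr hne
  have hmax : max nums.length 1 = nums.length := by omega
  refine ⟨hP.1, fun k hk => ?_⟩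
  have := hP.2 k hk
  rw [hmax, if_pos hk] at this
  exact this

lemma pArr_getD (nums : List Int) (hne : nums ≠ []) (j : Nat) (hj : j < nums.length) :
    PySem.List.pyGetD (pArr nums) (j : Int) 0 = ((sArr nums).take (j+1)).sum := by
  rw [PySem.List.pyGetD_natCast]
  exact (pArr_char nums hne).2 j hj

lemma pArr_last (nums : List Int) (hne : nums ≠ []) :
    PySem.List.pyGetD (pArr nums) (-1) 0 = (sArr nums).sum := by
  have hpos : 0 < nums.length := List.length_pos_iff.mpr hne
  have hl := (pArr_char nums hne).1
  have hne' : pArr nums ≠ [] := by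
    intro h; rw [h] at hl; simp at hl; omega
  rw [PySem.List.pyGetD_neg_ofNat (pArr nums) 1 0 (by omega) (by simp [hl]; omega)]
  have h1 : (pArr nums).length - 1 < nums.length := by omega
  have hv2 := (pArr_char nums hne).2 ((pArr nums).length - 1) h1
  rw [List.getD_eq_getElem _ _ (by omega)] at hv2
  have h2 : (pArr nums).length - 1 + 1 = (sArr nums).length := by
    rw [hl, length_sArr]; omega
  have h3 : ((sArr nums).take ((pArr nums).length - 1 + 1)).sum = (sArr nums).sum := by
    rw [h2, List.take_length]
  exact hv2.trans h3

-- the pair stored at position j of the sorted list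
lemma qpairs_at (nums : List Int) (j : Nat) (hj : j < nums.length) :
    ∃ (k : Nat) (hk : k < nums.length),
      (iArr nums).getD j 0 = (k : Int) ∧ (sArr nums).getD j 0 = nums[k] := by
  have hq : (qpairs nums).length = nums.length := length_qpairs nums
  have hj' : j < (qpairs nums).length := by omega
  obtain ⟨k, hk, he⟩ := qpairs_mem nums (List.getElem_mem hj')
  refine ⟨k, hk, ?_, ?_⟩
  · rw [iArr, List.getD_eq_getElem _ _ (by simpa [hq] using hj), List.getElem_map, he]
  · rw [sArr, List.getD_eq_getElem _ _ (by simpa [hq] using hj), List.getElem_map, he]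

-- the result fold: length and pointwise characterisation
lemma result_inv (nums : List Int) (hne : nums ≠ []) (m : Nat) (hm : m ≤ nums.length) :
    ((PySem.List.pyRange 0 (m : Int) 1).foldl
      (fun res i => PySem.List.pySetD res (PySem.List.pyGetD (iArr nums) i 0)
        ((PySem.List.pyGetD (sArr nums) i 0 * i - (PySem.List.pyGetD (pArr nums) i 0 - PySem.List.pyGetD (sArr nums) i 0))
          + ((PySem.List.pyGetD (pArr nums) (-1) 0 - PySem.List.pyGetD (pArr nums) i 0)
            - PySem.List.pyGetD (sArr nums) i 0 * ((nums.length : Int) - i - 1))))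
      (List.replicate nums.length (0 : Int))).length = nums.length
    ∧ ∀ k : Nat, k < nums.length →
      ((PySem.List.pyRange 0 (m : Int) 1).foldl
        (fun res i => PySem.List.pySetD res (PySem.List.pyGetD (iArr nums) i 0)
          ((PySem.List.pyGetD (sArr nums) i 0 * i - (PySem.List.pyGetD (pArr nums) i 0 - PySem.List.pyGetD (sArr nums) i 0))
            + ((PySem.List.pyGetD (pArr nums) (-1) 0 - PySem.List.pyGetD (pArr nums) i 0)
              - PySem.List.pyGetD (sArr nums) i 0 * ((nums.length : Int) - i - 1))))
        (List.replicate nums.length (0 : Int))).getD k 0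
      = if (k : Int) ∈ (iArr nums).take m then gsum nums (nums.getD k 0) else 0 := by
  induction m with
  | zero =>
    rw [show ((0:Nat) : Int) = 0 from rfl, PySem.List.pyRange_one_eq_nil (by norm_num)]
    refine ⟨by simp, fun k hk => ?_⟩
    rw [List.foldl_nil, List.getD_eq_getElem _ _ (by simpa using hk), List.getElem_replicate]
    simp
  | succ m ih =>
    have hm' : m ≤ nums.length := by omega
    obtain ⟨ihl, ihv⟩ := ih hm'
    have hrange : PySem.List.pyRange 0 ((m+1 : Nat) : Int) 1
        = PySem.List.pyRange 0 (m : Int) 1 ++ [(m : Int)] := by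
      have h : ((m+1 : Nat) : Int) = (m : Int) + 1 := by push_cast; ring
      rw [h, PySem.List.pyRange_one_succ_right (by positivity)]
    rw [hrange, List.foldl_append, List.foldl_cons, List.foldl_nil]
    obtain ⟨k0, hk0, hidx, hsv⟩ := qpairs_at nums m (by omega)
    have hv := value_eq (sArr nums) nums (qpairs_fst_perm nums) (qpairs_sorted nums) m
      (by rw [length_sArr]; omega)
    rw [length_sArr] at hv
    have hw : (PySem.List.pyGetD (sArr nums) (m : Int) 0 * (m : Int)
          - (PySem.List.pyGetD (pArr nums) (m : Int) 0 - PySem.List.pyGetD (sArr nums) (m : Int) 0))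
        + ((PySem.List.pyGetD (pArr nums) (-1) 0 - PySem.List.pyGetD (pArr nums) (m : Int) 0)
          - PySem.List.pyGetD (sArr nums) (m : Int) 0 * ((nums.length : Int) - (m : Int) - 1))
        = gsum nums (nums.getD k0 0) := by
      rw [pArr_getD nums hne m (by omega), pArr_last nums hne, PySem.List.pyGetD_natCast]
      have hd : nums.getD k0 0 = nums[k0] := List.getD_eq_getElem nums 0 hk0
      rw [hd, ← hsv]
      calc _ = (sArr nums).getD m 0 * (m:Int) - (((sArr nums).take (m+1)).sum - (sArr nums).getD m 0)
            + (((sArr nums).sum - ((sArr nums).take (m+1)).sum)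
              - (sArr nums).getD m 0 * ((nums.length : Int) - m - 1)) := by ring
        _ = gsum nums ((sArr nums).getD m 0) := hv
    have hidx' : PySem.List.pyGetD (iArr nums) (m : Int) 0 = (k0 : Int) := by
      rw [PySem.List.pyGetD_natCast]; exact hidx
    rw [hidx', hw, PySem.List.pySetD_natCast]
    have hmi : m < (iArr nums).length := by rw [length_iArr]; omega
    have htk : (iArr nums).take (m+1) = (iArr nums).take m ++ [(k0 : Int)] := by
      rw [List.take_add_one, List.getElem?_eq_getElem hmi]
      have : (iArr nums)[m] = (k0 : Int) := by
        rw [← List.getD_eq_getElem _ 0 hmi]; exact hidx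
      rw [this]; rfl
    refine ⟨by simpa using ihl, fun k hk => ?_⟩
    rw [List.getD_eq_getElem _ _ (by rw [List.length_set, ihl]; exact hk), List.getElem_set, htk]
    by_cases hkk : k0 = k
    · subst hkk
      rw [if_pos rfl, if_pos (by simp)]
    · rw [if_neg hkk]
      have hm2 : ((k : Int) ∈ (iArr nums).take m ++ [(k0 : Int)]) ↔ ((k : Int) ∈ (iArr nums).take m) := by
        simp only [List.mem_append, List.mem_singleton]
        constructor
        · rintro (h | h)
          · exact h
          · exact (hkk (by exact_mod_cast h.symm)).elim
        · exact Or.inl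
      rw [if_congr hm2 rfl rfl]
      have hthis := ihv k hk
      rw [List.getD_eq_getElem _ _ (by rw [ihl]; exact hk)] at hthis
      exact hthis

-- ===== VERDICT =====
theorem sum_of_distances_spec : Claim_equal_sum_of_distances := by
  intro nums _ hne
  unfold Spec_sum_of_distances
  have hA : sum_of_distances nums
      = (PySem.List.pyRange 0 ((nums.length : Nat) : Int) 1).foldl
        (fun res i => PySem.List.pySetD res (PySem.List.pyGetD (iArr nums) i 0)
          ((PySem.List.pyGetD (sArr nums) i 0 * i - (PySem.List.pyGetD (pArr nums) i 0 - PySem.List.pyGetD (sArr nums) i 0))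
            + ((PySem.List.pyGetD (pArr nums) (-1) 0 - PySem.List.pyGetD (pArr nums) i 0)
              - PySem.List.pyGetD (sArr nums) i 0 * ((nums.length : Int) - i - 1))))
        (List.replicate nums.length (0 : Int)) := rfl
  obtain ⟨hl, hv⟩ := result_inv nums hne nums.length (le_refl _)
  rw [hA]
  have hBlen : (sum_of_distances_alt nums).length = nums.length := by
    simp [sum_of_distances_alt]
  apply List.ext_getElem (by rw [hl, hBlen])
  intro k h1 h2
  have hk : k < nums.length := by rw [hl] at h1; exact h1
  have hmem : ((k : Int)) ∈ (iArr nums).take nums.length := by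
    have ht : (iArr nums).take nums.length = iArr nums := by
      apply List.take_of_length_le; rw [length_iArr]
    rw [ht]
    exact ((qpairs_snd_perm nums).mem_iff).mpr
      (by rw [PySem.List.mem_pyRange_one]; exact ⟨by positivity, by exact_mod_cast hk⟩)
  have h := hv k hk
  rw [if_pos hmem] at h
  rw [← List.getD_eq_getElem _ 0 h1, h]
  simp [sum_of_distances_alt, gsum, List.getElem?_eq_getElem hk]
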